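-- pv_equiv track=rewrite | github.com/abhi8sk26/Optimal_Charging_Station_Placement | src/utils/reachability_check.py | can_all_robot_reach_target
-- ===== SOURCE A (Python) =====
-- from collections import deque
--
-- def manhattan_distance(start, end):
--     return abs(start[0] - end[0]) + abs(start[1] - end[1])
--
-- def can_all_robot_reach_target(target, robots, stations, capacity, visited_robots=None, visited_stations=None):
--     if visited_robots is None:
--         visited_robots = set()
--     if visited_stations is None:
--         visited_stations = set()
--
--     queue = deque([target])
--
--     while queue:
--         curr_target = queue.popleft()
--
--         for robot in robots:
--             if robot not in visited_robots and manhattan_distance(robot, curr_target) <= capacity: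
--                 visited_robots.add(robot)
--
--         for station in stations:
--             if station not in visited_stations and manhattan_distance(station, curr_target) <= capacity:
--                 visited_stations.add(station)
--                 queue.append(station)
--
--     return len(robots) == len(visited_robots)
-- ===== SOURCE B (Python) =====
-- def can_all_robot_reach_target(target, robots, stations, capacity, visited_robots=None, visited_stations=None):
--     vr0 = set() if visited_robots is None else visited_robots
--     vs0 = set() if visited_stations is None else visited_stations
--
--     def close(a, b):
--         return abs(a[0] - b[0]) + abs(a[1] - b[1]) <= capacity
--
--     # distinct stations still available (not pre-visited), in first-occurrence order
--     cand = []
--     for s in stations: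
--         if s not in vs0 and s not in cand:
--             cand.append(s)
--
--     # saturate the set of points connected to the target
--     pts = [target]
--     for _ in range(len(cand)):
--         new = [s for s in cand if s not in pts and any(close(s, p) for p in pts)]
--         if not new:
--             break
--         pts.extend(new)
--
--     visited = set(vr0)
--     for r in robots:
--         if any(close(r, p) for p in pts):
--             visited.add(r)
--     return len(robots) == len(visited)
-- ===== Notes on version B (the rewrite author's own statement) =====
-- stated objective: alternative
-- what changed: Replaces A's BFS queue that interleaves robot marking into every dequeue with a round-based saturation of the target-connected point set over the deduplicated available stations, followed by a single final pass that counts robots close to some reached point; equivalence rests on the traversal-order independence of the reachability closure.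
import Mathlib
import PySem

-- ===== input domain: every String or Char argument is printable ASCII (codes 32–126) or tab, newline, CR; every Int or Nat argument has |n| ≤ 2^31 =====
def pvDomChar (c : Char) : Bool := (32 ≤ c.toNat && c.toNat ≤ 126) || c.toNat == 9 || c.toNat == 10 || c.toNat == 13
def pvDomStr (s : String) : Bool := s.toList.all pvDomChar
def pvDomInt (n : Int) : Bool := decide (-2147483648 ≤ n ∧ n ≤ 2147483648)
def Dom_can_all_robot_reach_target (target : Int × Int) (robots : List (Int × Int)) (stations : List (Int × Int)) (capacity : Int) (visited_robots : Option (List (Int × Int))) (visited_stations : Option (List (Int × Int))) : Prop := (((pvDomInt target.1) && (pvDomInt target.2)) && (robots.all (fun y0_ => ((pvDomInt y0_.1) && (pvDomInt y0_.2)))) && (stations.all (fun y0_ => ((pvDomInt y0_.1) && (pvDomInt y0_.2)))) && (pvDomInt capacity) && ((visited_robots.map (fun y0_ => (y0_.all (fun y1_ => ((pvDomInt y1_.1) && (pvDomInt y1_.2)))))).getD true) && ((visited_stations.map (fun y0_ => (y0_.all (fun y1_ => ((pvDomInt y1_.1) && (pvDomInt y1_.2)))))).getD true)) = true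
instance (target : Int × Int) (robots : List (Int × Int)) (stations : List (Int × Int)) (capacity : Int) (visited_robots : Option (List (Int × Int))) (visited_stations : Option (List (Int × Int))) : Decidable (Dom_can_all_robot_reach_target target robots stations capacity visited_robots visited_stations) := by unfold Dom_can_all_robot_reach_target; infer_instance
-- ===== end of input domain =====

-- ===== PORT A =====
-- B replaces A's BFS queue (which interleaves robot marking into every dequeue) with a
-- round-based saturation of the target-connected point set over the deduplicated available
-- stations, followed by one final robot-counting pass (objective: alternative).
-- A mutates the caller's visited_robots/visited_stations sets in place; the equivalence
-- proved here is about the RETURN value only (B does not mutate its arguments).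
def manhattan_distance (s e : Int × Int) : Int := |s.1 - e.1| + |s.2 - e.2|

def pvMark (robots : List (Int × Int)) (capacity : Int) (p : Int × Int)
    (vr : PySem.Set (Int × Int)) : PySem.Set (Int × Int) :=
  robots.foldl (fun vr r =>
    if r ∉ vr ∧ manhattan_distance r p ≤ capacity then PySem.Set.add vr r else vr) vr

def pvScan (stations : List (Int × Int)) (capacity : Int) (p : Int × Int)
    (st : PySem.Set (Int × Int) × List (Int × Int)) : PySem.Set (Int × Int) × List (Int × Int) :=
  stations.foldl (fun st s =>
    if s ∉ st.1 ∧ manhattan_distance s p ≤ capacity then (PySem.Set.add st.1 s, st.2 ++ [s]) else st) st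

def pvBfsLoop (robots stations : List (Int × Int)) (capacity : Int) :
    Nat → List (Int × Int) → PySem.Set (Int × Int) → PySem.Set (Int × Int) → PySem.Set (Int × Int)
  | 0, _, vr, _ => vr
  | _ + 1, [], vr, _ => vr
  | fuel + 1, p :: queue, vr, vs =>
      let vr' := pvMark robots capacity p vr
      let st' := pvScan stations capacity p (vs, queue)
      pvBfsLoop robots stations capacity fuel st'.2 vr' st'.1

def can_all_robot_reach_target (target : Int × Int) (robots : List (Int × Int)) (stations : List (Int × Int)) (capacity : Int) (visited_robots : Option (List (Int × Int))) (visited_stations : Option (List (Int × Int))) : Bool :=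
  let vr0 : PySem.Set (Int × Int) := PySem.Set.ofList (visited_robots.getD [])
  let vs0 : PySem.Set (Int × Int) := PySem.Set.ofList (visited_stations.getD [])
  let vrF := pvBfsLoop robots stations capacity (stations.length + 1) [target] vr0 vs0
  robots.length == vrF.length

-- ===== PORT B =====
def pvCloseB (capacity : Int) (a b : Int × Int) : Bool :=
  decide (|a.1 - b.1| + |a.2 - b.2| ≤ capacity)

def pvCand (stations : List (Int × Int)) (vs0 : List (Int × Int)) : List (Int × Int) :=
  stations.foldl (fun c s => if s ∉ vs0 ∧ s ∉ c then c ++ [s] else c) []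

def pvRounds (cand : List (Int × Int)) (capacity : Int) :
    Nat → List (Int × Int) → List (Int × Int)
  | 0, pts => pts
  | k + 1, pts =>
      let nw := cand.filter (fun s => decide (s ∉ pts) && pts.any (fun p => pvCloseB capacity s p))
      if nw = [] then pts else pvRounds cand capacity k (pts ++ nw)

def can_all_robot_reach_target_alt (target : Int × Int) (robots : List (Int × Int)) (stations : List (Int × Int)) (capacity : Int) (visited_robots : Option (List (Int × Int))) (visited_stations : Option (List (Int × Int))) : Bool :=
  let vr0 : PySem.Set (Int × Int) := PySem.Set.ofList (visited_robots.getD [])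
  let vs0 : PySem.Set (Int × Int) := PySem.Set.ofList (visited_stations.getD [])
  let cand := pvCand stations vs0
  let pts := pvRounds cand capacity cand.length [target]
  let visited := robots.foldl (fun v r =>
    if pts.any (fun p => pvCloseB capacity r p) then PySem.Set.add v r else v) vr0
  robots.length == visited.length

-- ===== PRECONDITION & SPEC =====
def Spec_can_all_robot_reach_target (target : Int × Int) (robots : List (Int × Int)) (stations : List (Int × Int)) (capacity : Int) (visited_robots : Option (List (Int × Int))) (visited_stations : Option (List (Int × Int))) (out : Bool) : Prop := out = can_all_robot_reach_target_alt target robots stations capacity visited_robots visited_stations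
instance (target : Int × Int) (robots : List (Int × Int)) (stations : List (Int × Int)) (capacity : Int) (visited_robots : Option (List (Int × Int))) (visited_stations : Option (List (Int × Int))) (out : Bool) : Decidable (Spec_can_all_robot_reach_target target robots stations capacity visited_robots visited_stations out) := by unfold Spec_can_all_robot_reach_target; infer_instance

-- ===== CLAIM (what is proved, stated in full; the proofs are below) =====
def Claim_equal_can_all_robot_reach_target : Prop := ∀ (target : Int × Int) (robots : List (Int × Int)) (stations : List (Int × Int)) (capacity : Int) (visited_robots : Option (List (Int × Int))) (visited_stations : Option (List (Int × Int))), Dom_can_all_robot_reach_target target robots stations capacity visited_robots visited_stations → Spec_can_all_robot_reach_target target robots stations capacity visited_robots visited_stations (can_all_robot_reach_target target robots stations capacity visited_robots visited_stations)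

-- ===== LEMMAS AND PROOFS =====

lemma mem_pvCand_aux (vs0 : List (Int × Int)) :
    ∀ (ss acc : List (Int × Int)) (x : Int × Int),
      x ∈ ss.foldl (fun c s => if s ∉ vs0 ∧ s ∉ c then c ++ [s] else c) acc ↔
        x ∈ acc ∨ (x ∈ ss ∧ x ∉ vs0)
  | [], acc, x => by simp
  | s :: ss, acc, x => by
      simp only [List.foldl_cons]
      by_cases h : s ∉ vs0 ∧ s ∉ acc
      · rw [if_pos h, mem_pvCand_aux vs0 ss (acc ++ [s]) x]
        simp only [List.mem_append, List.mem_cons]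
        by_cases hx : x = s
        · subst hx; tauto
        · tauto
      · rw [if_neg h]
        rw [mem_pvCand_aux vs0 ss acc x]
        simp only [List.mem_cons]
        by_cases hx : x = s
        · subst hx; tauto
        · tauto

lemma mem_pvCand (stations vs0 : List (Int × Int)) (x : Int × Int) :
    x ∈ pvCand stations vs0 ↔ x ∈ stations ∧ x ∉ vs0 := by
  rw [pvCand, mem_pvCand_aux]; simp

lemma nodup_pvCand_aux (vs0 : List (Int × Int)) :
    ∀ (ss acc : List (Int × Int)), acc.Nodup →
      (ss.foldl (fun c s => if s ∉ vs0 ∧ s ∉ c then c ++ [s] else c) acc).Nodup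
  | [], acc, h => h
  | s :: ss, acc, h => by
      simp only [List.foldl_cons]
      by_cases hg : s ∉ vs0 ∧ s ∉ acc
      · rw [if_pos hg]
        exact nodup_pvCand_aux vs0 ss (acc ++ [s])
          (by
            refine List.Nodup.append h (List.nodup_singleton s) ?_
            intro a ha hb; simp at hb; subst hb
            exact hg.2 ha)
      · rw [if_neg hg]; exact nodup_pvCand_aux vs0 ss acc h

lemma nodup_pvCand (stations vs0 : List (Int × Int)) : (pvCand stations vs0).Nodup :=
  nodup_pvCand_aux vs0 stations [] List.nodup_nil

lemma pvMark_step (capacity : Int) (p r : Int × Int) (vr : List (Int × Int)) (x : Int × Int) :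
    (x ∈ if r ∉ vr ∧ manhattan_distance r p ≤ capacity then PySem.Set.add vr r else vr) ↔
      x ∈ vr ∨ (x = r ∧ manhattan_distance r p ≤ capacity) := by
  by_cases h : r ∉ vr ∧ manhattan_distance r p ≤ capacity
  · rw [if_pos h, PySem.Set.mem_add]; tauto
  · rw [if_neg h]
    constructor
    · tauto
    · rintro (hx | ⟨rfl, hc⟩)
      · exact hx
      · rcases not_and_or.mp h with h1 | h2
        · exact not_not.mp h1
        · exact absurd hc h2

lemma mem_pvMark (robots : List (Int × Int)) (capacity : Int) (p : Int × Int) :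
    ∀ (vr : List (Int × Int)) (x : Int × Int),
    x ∈ pvMark robots capacity p vr ↔
      x ∈ vr ∨ (x ∈ robots ∧ manhattan_distance x p ≤ capacity) := by
  induction robots with
  | nil => intro vr x; simp [pvMark]
  | cons r rs ih =>
      intro vr x
      simp only [pvMark, List.foldl_cons] at *
      rw [ih]
      rw [pvMark_step capacity p r vr x]
      simp only [List.mem_cons]
      by_cases hx : x = r
      · subst hx; tauto
      · tauto

lemma nodup_pvMark (robots : List (Int × Int)) (capacity : Int) (p : Int × Int) :
    ∀ (vr : List (Int × Int)), vr.Nodup → (pvMark robots capacity p vr).Nodup := by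
  induction robots with
  | nil => intro vr h; simpa [pvMark] using h
  | cons r rs ih =>
      intro vr h
      simp only [pvMark, List.foldl_cons] at *
      by_cases hg : r ∉ vr ∧ manhattan_distance r p ≤ capacity
      · rw [if_pos hg]; exact ih _ (PySem.Set.nodup_add _ _ h)
      · rw [if_neg hg]; exact ih _ h

lemma pvScan_spec (capacity : Int) (p : Int × Int) :
    ∀ (stations vs q : List (Int × Int)), ∃ nw : List (Int × Int),
      pvScan stations capacity p (vs, q) = (vs ++ nw, q ++ nw) ∧ nw.Nodup ∧
      (∀ x ∈ nw, x ∉ vs) ∧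
      (∀ x, x ∈ vs ++ nw ↔ x ∈ vs ∨ (x ∈ stations ∧ manhattan_distance x p ≤ capacity)) := by
  intro stations
  induction stations with
  | nil => intro vs q; exact ⟨[], by simp [pvScan]⟩
  | cons s ss ih =>
      intro vs q
      simp only [pvScan, List.foldl_cons]
      by_cases hg : s ∉ vs ∧ manhattan_distance s p ≤ capacity
      · rw [if_pos hg]
        have hadd : PySem.Set.add vs s = vs ++ [s] := PySem.Set.add_of_not_mem hg.1
        rw [hadd]
        obtain ⟨nw', heq, hnd, hnv, hmem⟩ := ih (vs ++ [s]) (q ++ [s])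
        refine ⟨s :: nw', ?_, ?_, ?_, ?_⟩
        · simpa only [List.append_assoc, List.singleton_append] using heq
        · refine List.Nodup.cons ?_ hnd
          intro hsm
          exact (hnv s hsm) (by simp)
        · intro x hx
          rcases List.mem_cons.mp hx with rfl | hx'
          · exact hg.1
          · intro hxvs; exact hnv x hx' (by simp [hxvs])
        · intro x
          have h2 := hmem x
          simp only [List.mem_append, List.mem_cons, List.not_mem_nil, or_false] at h2 ⊢
          by_cases hx : x = s
          · subst hx; tauto
          · tauto
      · rw [if_neg hg]
        obtain ⟨nw, heq, hnd, hnv, hmem⟩ := ih vs q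
        refine ⟨nw, heq, hnd, hnv, ?_⟩
        intro x
        rw [hmem x]
        simp only [List.mem_cons]
        by_cases hx : x = s
        · subst hx
          constructor
          · tauto
          · rintro (hv | ⟨_, hc⟩)
            · exact Or.inl hv
            · rcases not_and_or.mp hg with h1 | h2
              · exact Or.inl (not_not.mp h1)
              · exact absurd hc h2
        · tauto

def pvMu (stations vs : List (Int × Int)) : Nat :=
  (stations.toFinset.filter (fun s => s ∉ vs)).card

lemma pvMu_bound (stations vs nw : List (Int × Int)) (hn : nw.Nodup)
    (hsub : ∀ x ∈ nw, x ∈ stations ∧ x ∉ vs) :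
    pvMu stations (vs ++ nw) + nw.length ≤ pvMu stations vs := by
  classical
  have hdisj : Disjoint (stations.toFinset.filter (fun s => s ∉ vs ++ nw)) nw.toFinset := by
    rw [Finset.disjoint_left]
    intro a ha hb
    have := (Finset.mem_filter.mp ha).2
    simp only [List.mem_append] at this
    exact this (Or.inr (List.mem_toFinset.mp hb))
  have hsubset : stations.toFinset.filter (fun s => s ∉ vs ++ nw) ∪ nw.toFinset ⊆
      stations.toFinset.filter (fun s => s ∉ vs) := by
    intro a ha
    rcases Finset.mem_union.mp ha with h | h
    · have := Finset.mem_filter.mp h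
      refine Finset.mem_filter.mpr ⟨this.1, ?_⟩
      intro hv; exact this.2 (by simp [hv])
    · have ha' := List.mem_toFinset.mp h
      obtain ⟨h1, h2⟩ := hsub a ha'
      exact Finset.mem_filter.mpr ⟨List.mem_toFinset.mpr h1, h2⟩
  calc pvMu stations (vs ++ nw) + nw.length
      = (stations.toFinset.filter (fun s => s ∉ vs ++ nw)).card + nw.toFinset.card := by
        rw [List.toFinset_card_of_nodup hn]; rfl
    _ = (stations.toFinset.filter (fun s => s ∉ vs ++ nw) ∪ nw.toFinset).card := by
        rw [Finset.card_union_of_disjoint hdisj]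
    _ ≤ pvMu stations vs := Finset.card_le_card hsubset

inductive PvReach (capacity : Int) (t : Int × Int) (cand : List (Int × Int)) : (Int × Int) → Prop
  | base : PvReach capacity t cand t
  | step {p s : Int × Int} : PvReach capacity t cand p → s ∈ cand →
      manhattan_distance s p ≤ capacity → PvReach capacity t cand s

def PvOK (capacity : Int) (t : Int × Int) (cand : List (Int × Int)) (r : Int × Int) : Prop :=
  ∃ p, PvReach capacity t cand p ∧ manhattan_distance r p ≤ capacity

def PvInvA (capacity : Int) (t : Int × Int) (robots stations vr0 vs0 : List (Int × Int))
    (queue vr vs : List (Int × Int)) : Prop :=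
  vr.Nodup ∧
  (∀ x ∈ vr, x ∈ vr0 ∨ (x ∈ robots ∧ PvOK capacity t (pvCand stations vs0) x)) ∧
  (∀ x ∈ vr0, x ∈ vr) ∧
  (∀ q ∈ queue, PvReach capacity t (pvCand stations vs0) q) ∧
  (∀ p ∈ vs, p ∈ vs0 ∨ (p ∈ stations ∧ PvReach capacity t (pvCand stations vs0) p)) ∧
  (∀ x ∈ vs0, x ∈ vs) ∧
  (∀ s, s ∈ stations → s ∉ vs → ∀ p, (p = t ∨ (p ∈ vs ∧ p ∉ vs0)) → p ∉ queue →
      ¬ manhattan_distance s p ≤ capacity) ∧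
  (∀ r ∈ robots, r ∉ vr → ∀ p, (p = t ∨ (p ∈ vs ∧ p ∉ vs0)) → p ∉ queue →
      ¬ manhattan_distance r p ≤ capacity)

lemma pvReach_finished (capacity : Int) (t : Int × Int)
    (robots stations vr0 vs0 vr vs : List (Int × Int))
    (hinv : PvInvA capacity t robots stations vr0 vs0 [] vr vs) :
    ∀ p, PvReach capacity t (pvCand stations vs0) p → p = t ∨ (p ∈ vs ∧ p ∉ vs0) := by
  obtain ⟨h1, h2, h3, h4, h5, h6, h7, h8⟩ := hinv
  intro p hp
  induction hp with
  | base => exact Or.inl rfl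
  | @step p' s hp' hs hclose ih =>
      have hsc := (mem_pvCand stations vs0 s).mp hs
      by_cases hsv : s ∈ vs
      · exact Or.inr ⟨hsv, hsc.2⟩
      · exact absurd hclose (h7 s hsc.1 hsv p' ih (List.not_mem_nil))

lemma pvFinal_of_inv (capacity : Int) (t : Int × Int)
    (robots stations vr0 vs0 vr vs : List (Int × Int))
    (hinv : PvInvA capacity t robots stations vr0 vs0 [] vr vs) :
    ∀ x, x ∈ vr ↔ x ∈ vr0 ∨ (x ∈ robots ∧ PvOK capacity t (pvCand stations vs0) x) := by
  have hfin := pvReach_finished capacity t robots stations vr0 vs0 vr vs hinv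
  obtain ⟨h1, h2, h3, h4, h5, h6, h7, h8⟩ := hinv
  intro x
  constructor
  · exact h2 x
  · rintro (hx | ⟨hxr, p, hreach, hclose⟩)
    · exact h3 x hx
    · by_contra hxvr
      exact h8 x hxr hxvr p (hfin p hreach) (List.not_mem_nil) hclose

lemma pvBfsLoop_spec (capacity : Int) (t : Int × Int) (robots stations vr0 vs0 : List (Int × Int)) :
    ∀ (fuel : Nat) (queue vr vs : List (Int × Int)),
      PvInvA capacity t robots stations vr0 vs0 queue vr vs →
      queue.length + pvMu stations vs ≤ fuel →
      (pvBfsLoop robots stations capacity fuel queue vr vs).Nodup ∧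
      (∀ x, x ∈ pvBfsLoop robots stations capacity fuel queue vr vs ↔
        x ∈ vr0 ∨ (x ∈ robots ∧ PvOK capacity t (pvCand stations vs0) x)) := by
  intro fuel
  induction fuel with
  | zero =>
      intro queue vr vs hinv hm
      have hq : queue = [] := by
        cases queue with
        | nil => rfl
        | cons a l => simp at hm
      subst hq
      exact ⟨hinv.1, pvFinal_of_inv capacity t robots stations vr0 vs0 vr vs hinv⟩
  | succ n ih =>
      intro queue vr vs hinv hm
      cases queue with
      | nil =>
          exact ⟨hinv.1, pvFinal_of_inv capacity t robots stations vr0 vs0 vr vs hinv⟩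
      | cons p rest =>
          obtain ⟨nw, heq, hnd, hnv, hmem⟩ := pvScan_spec capacity p stations vs rest
          obtain ⟨h1, h2, h3, h4, h5, h6, h7, h8⟩ := hinv
          have hreachp : PvReach capacity t (pvCand stations vs0) p := h4 p (List.mem_cons_self)
          -- facts about nw
          have hnwst : ∀ x ∈ nw, x ∈ stations ∧ manhattan_distance x p ≤ capacity := by
            intro x hx
            have := (hmem x).mp (List.mem_append.mpr (Or.inr hx))
            rcases this with hv | hst
            · exact absurd hv (hnv x hx)
            · exact hst
          have hnwreach : ∀ x ∈ nw, PvReach capacity t (pvCand stations vs0) x := by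
            intro x hx
            obtain ⟨hs, hc⟩ := hnwst x hx
            have hx0 : x ∉ vs0 := fun h0 => (hnv x hx) (h6 x h0)
            exact PvReach.step hreachp ((mem_pvCand stations vs0 x).mpr ⟨hs, hx0⟩) hc
          -- one unfolding of the loop
          have hstep : pvBfsLoop robots stations capacity (n + 1) (p :: rest) vr vs =
              pvBfsLoop robots stations capacity n (rest ++ nw)
                (pvMark robots capacity p vr) (vs ++ nw) := by
            show pvBfsLoop robots stations capacity n
                (pvScan stations capacity p (vs, rest)).2 (pvMark robots capacity p vr)
                (pvScan stations capacity p (vs, rest)).1 = _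
            rw [heq]
          rw [hstep]
          apply ih
          · refine ⟨nodup_pvMark robots capacity p vr h1, ?_, ?_, ?_, ?_, ?_, ?_, ?_⟩
            · intro x hx
              rcases (mem_pvMark robots capacity p vr x).mp hx with hold | ⟨hr, hc⟩
              · exact h2 x hold
              · exact Or.inr ⟨hr, p, hreachp, hc⟩
            · intro x hx
              exact (mem_pvMark robots capacity p vr x).mpr (Or.inl (h3 x hx))
            · intro q hq
              rcases List.mem_append.mp hq with hq | hq
              · exact h4 q (List.mem_cons_of_mem p hq)
              · exact hnwreach q hq
            · intro x hx
              rcases List.mem_append.mp hx with hx | hx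
              · exact h5 x hx
              · have hx0 : x ∉ vs0 := fun h0 => (hnv x hx) (h6 x h0)
                exact Or.inr ⟨(hnwst x hx).1, hnwreach x hx⟩
            · intro x hx
              exact List.mem_append.mpr (Or.inl (h6 x hx))
            · intro s hs hsn p₀ hp₀ hp₀q hclose
              have hsnvs : s ∉ vs := fun h => hsn (List.mem_append.mpr (Or.inl h))
              by_cases hpp : p₀ = p
              · subst hpp
                exact hsn ((hmem s).mpr (Or.inr ⟨hs, hclose⟩))
              · have hp₀rest : p₀ ∉ rest := fun h => hp₀q (List.mem_append.mpr (Or.inl h))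
                have hp₀nw : p₀ ∉ nw := fun h => hp₀q (List.mem_append.mpr (Or.inr h))
                have hold : p₀ = t ∨ (p₀ ∈ vs ∧ p₀ ∉ vs0) := by
                  rcases hp₀ with rfl | ⟨hv, h0⟩
                  · exact Or.inl rfl
                  · rcases List.mem_append.mp hv with hv | hv
                    · exact Or.inr ⟨hv, h0⟩
                    · exact absurd hv hp₀nw
                have hnotmem : p₀ ∉ p :: rest := by
                  intro h
                  rcases List.mem_cons.mp h with h | h
                  · exact hpp h
                  · exact hp₀rest h
                exact h7 s hs hsnvs p₀ hold hnotmem hclose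
            · intro r hr hrn p₀ hp₀ hp₀q hclose
              have hrold : r ∉ vr ∧ ¬(r ∈ robots ∧ manhattan_distance r p ≤ capacity) := by
                constructor
                · intro h; exact hrn ((mem_pvMark robots capacity p vr r).mpr (Or.inl h))
                · intro h; exact hrn ((mem_pvMark robots capacity p vr r).mpr (Or.inr h))
              by_cases hpp : p₀ = p
              · subst hpp
                exact hrold.2 ⟨hr, hclose⟩
              · have hp₀rest : p₀ ∉ rest := fun h => hp₀q (List.mem_append.mpr (Or.inl h))
                have hp₀nw : p₀ ∉ nw := fun h => hp₀q (List.mem_append.mpr (Or.inr h))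
                have hold : p₀ = t ∨ (p₀ ∈ vs ∧ p₀ ∉ vs0) := by
                  rcases hp₀ with rfl | ⟨hv, h0⟩
                  · exact Or.inl rfl
                  · rcases List.mem_append.mp hv with hv | hv
                    · exact Or.inr ⟨hv, h0⟩
                    · exact absurd hv hp₀nw
                have hnotmem : p₀ ∉ p :: rest := by
                  intro h
                  rcases List.mem_cons.mp h with h | h
                  · exact hpp h
                  · exact hp₀rest h
                exact h8 r hr hrold.1 p₀ hold hnotmem hclose
          · have hb := pvMu_bound stations vs nw hnd
              (fun x hx => ⟨(hnwst x hx).1, hnv x hx⟩)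
            simp only [List.length_append, List.length_cons] at hm ⊢
            omega

lemma pvCloseB_iff (capacity : Int) (a b : Int × Int) :
    pvCloseB capacity a b = true ↔ manhattan_distance a b ≤ capacity := by
  simp [pvCloseB, manhattan_distance]

lemma mem_pvFilter (cand pts : List (Int × Int)) (capacity : Int) (x : Int × Int) :
    x ∈ cand.filter (fun s => decide (s ∉ pts) && pts.any (fun p => pvCloseB capacity s p)) ↔
      x ∈ cand ∧ x ∉ pts ∧ ∃ p ∈ pts, manhattan_distance x p ≤ capacity := by
  simp only [List.mem_filter, Bool.and_eq_true, decide_eq_true_eq, List.any_eq_true,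
    pvCloseB_iff]

lemma pvRounds_subset (cand : List (Int × Int)) (capacity : Int) :
    ∀ (k : Nat) (pts : List (Int × Int)), ∀ x ∈ pts, x ∈ pvRounds cand capacity k pts := by
  intro k
  induction k with
  | zero => intro pts x hx; exact hx
  | succ n ih =>
      intro pts x hx
      show x ∈ (if _ = ([] : List (Int × Int)) then pts else _)
      split
      · exact hx
      · exact ih _ x (List.mem_append.mpr (Or.inl hx))

lemma pvRounds_sound (capacity : Int) (t : Int × Int) (cand : List (Int × Int)) :
    ∀ (k : Nat) (pts : List (Int × Int)),
      (∀ p ∈ pts, PvReach capacity t cand p) →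
      ∀ p ∈ pvRounds cand capacity k pts, PvReach capacity t cand p := by
  intro k
  induction k with
  | zero => intro pts h p hp; exact h p hp
  | succ n ih =>
      intro pts h p hp
      rw [pvRounds] at hp
      split at hp
      · exact h p hp
      · refine ih (pts ++ _) ?_ p hp
        intro q hq
        rcases List.mem_append.mp hq with hq | hq
        · exact h q hq
        · obtain ⟨hc, _, p', hp', hclose⟩ := (mem_pvFilter cand pts capacity q).mp hq
          exact PvReach.step (h p' hp') hc hclose

lemma pvRounds_closed (capacity : Int) (t : Int × Int) (cand : List (Int × Int)) (hc : cand.Nodup) :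
    ∀ (k : Nat) (pts : List (Int × Int)), pts.Nodup → (∀ x ∈ pts, x = t ∨ x ∈ cand) →
      cand.length + 1 ≤ k + pts.length →
      ∀ s ∈ cand, s ∉ pvRounds cand capacity k pts →
        ∀ p ∈ pvRounds cand capacity k pts, ¬ manhattan_distance s p ≤ capacity := by
  intro k
  induction k with
  | zero =>
      intro pts hnd hsub hlen s hs hsn p _ _
      exfalso
      apply hsn
      show s ∈ pts
      have hsubF : pts.toFinset ⊆ insert t cand.toFinset := by
        intro a ha
        rcases hsub a (List.mem_toFinset.mp ha) with rfl | h
        · exact Finset.mem_insert_self a _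
        · exact Finset.mem_insert_of_mem (List.mem_toFinset.mpr h)
      have hcard : (insert t cand.toFinset).card ≤ pts.toFinset.card := by
        have h1 : (insert t cand.toFinset).card ≤ cand.toFinset.card + 1 :=
          Finset.card_insert_le t _
        have h2 : cand.toFinset.card = cand.length := List.toFinset_card_of_nodup hc
        have h3 : pts.toFinset.card = pts.length := List.toFinset_card_of_nodup hnd
        omega
      have heq := Finset.eq_of_subset_of_card_le hsubF hcard
      have : s ∈ pts.toFinset := by
        rw [heq]
        exact Finset.mem_insert_of_mem (List.mem_toFinset.mpr hs)
      exact List.mem_toFinset.mp this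
  | succ n ih =>
      intro pts hnd hsub hlen s hs hsn p hp hclose
      rw [pvRounds] at hsn hp
      by_cases hnw : cand.filter
          (fun s => decide (s ∉ pts) && pts.any (fun p => pvCloseB capacity s p)) = [] 
      · rw [if_pos hnw] at hsn hp
        have : s ∈ cand.filter
            (fun s => decide (s ∉ pts) && pts.any (fun p => pvCloseB capacity s p)) :=
          (mem_pvFilter cand pts capacity s).mpr ⟨hs, hsn, p, hp, hclose⟩
        rw [hnw] at this
        exact List.not_mem_nil this
      · rw [if_neg hnw] at hsn hp
        have hnwnd : (cand.filter
            (fun s => decide (s ∉ pts) && pts.any (fun p => pvCloseB capacity s p))).Nodup :=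
          List.Nodup.filter _ hc
        have hdisj : ∀ x ∈ cand.filter
            (fun s => decide (s ∉ pts) && pts.any (fun p => pvCloseB capacity s p)), x ∉ pts :=
          fun x hx => ((mem_pvFilter cand pts capacity x).mp hx).2.1
        refine ih (pts ++ _) ?_ ?_ ?_ s hs hsn p hp hclose
        · exact List.Nodup.append hnd hnwnd (fun a ha hb => hdisj a hb ha)
        · intro x hx
          rcases List.mem_append.mp hx with hx | hx
          · exact hsub x hx
          · exact Or.inr ((mem_pvFilter cand pts capacity x).mp hx).1
        · have hpos : 0 < (cand.filter
              (fun s => decide (s ∉ pts) && pts.any (fun p => pvCloseB capacity s p))).length :=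
            List.length_pos_of_ne_nil hnw
          simp only [List.length_append]
          omega

lemma mem_pvRounds_iff (capacity : Int) (t : Int × Int) (cand : List (Int × Int)) (hc : cand.Nodup) :
    ∀ x, x ∈ pvRounds cand capacity cand.length [t] ↔ PvReach capacity t cand x := by
  intro x
  constructor
  · exact pvRounds_sound capacity t cand cand.length [t]
      (fun p hp => by rcases List.mem_cons.mp hp with rfl | h
                      · exact PvReach.base
                      · exact absurd h (List.not_mem_nil)) x
  · intro hx
    induction hx with
    | base => exact pvRounds_subset cand capacity cand.length [t] t (List.mem_cons_self)
    | @step p' s hp' hs hclose ih =>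
        by_contra hsn
        exact pvRounds_closed capacity t cand hc cand.length [t] (List.nodup_singleton t)
          (fun x hx => by rcases List.mem_cons.mp hx with rfl | h
                          · exact Or.inl rfl
                          · exact absurd h (List.not_mem_nil))
          (by norm_num) s hs hsn p' ih hclose

lemma mem_pvVisit (capacity : Int) (pts : List (Int × Int)) :
    ∀ (robots vr0 : List (Int × Int)) (x : Int × Int),
    x ∈ robots.foldl (fun v r =>
        if pts.any (fun p => pvCloseB capacity r p) then PySem.Set.add v r else v) vr0 ↔
      x ∈ vr0 ∨ (x ∈ robots ∧ ∃ p ∈ pts, manhattan_distance x p ≤ capacity) := by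
  intro robots
  induction robots with
  | nil => intro vr0 x; simp
  | cons r rs ih =>
      intro vr0 x
      simp only [List.foldl_cons]
      rw [ih]
      have hstep : (x ∈ if pts.any (fun p => pvCloseB capacity r p)
          then PySem.Set.add vr0 r else vr0) ↔
          x ∈ vr0 ∨ (x = r ∧ ∃ p ∈ pts, manhattan_distance r p ≤ capacity) := by
        split
        · next h =>
            rw [PySem.Set.mem_add]
            simp only [List.any_eq_true, pvCloseB_iff] at h
            tauto
        · next h =>
            simp only [List.any_eq_true, pvCloseB_iff] at h
            push Not at h
            constructor
            · tauto
            · rintro (hv | ⟨rfl, p, hp, hc⟩)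
              · exact hv
              · exact absurd hc (not_le.mpr (h p hp))
      rw [hstep]
      simp only [List.mem_cons]
      by_cases hx : x = r
      · subst hx
        constructor
        · rintro ((hv | ⟨_, hc⟩) | ⟨_, hc⟩)
          · tauto
          · exact Or.inr ⟨Or.inl rfl, hc⟩
          · exact Or.inr ⟨Or.inl rfl, hc⟩
        · rintro (hv | ⟨_, hc⟩)
          · tauto
          · exact Or.inl (Or.inr ⟨rfl, hc⟩)
      · tauto

lemma nodup_pvVisit (capacity : Int) (pts : List (Int × Int)) :
    ∀ (robots vr0 : List (Int × Int)), vr0.Nodup →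
    (robots.foldl (fun v r =>
        if pts.any (fun p => pvCloseB capacity r p) then PySem.Set.add v r else v) vr0).Nodup := by
  intro robots
  induction robots with
  | nil => intro vr0 h; exact h
  | cons r rs ih =>
      intro vr0 h
      simp only [List.foldl_cons]
      split
      · exact ih _ (PySem.Set.nodup_add _ _ h)
      · exact ih _ h

lemma pv_main (target : Int × Int) (robots stations : List (Int × Int)) (capacity : Int)
    (visited_robots visited_stations : Option (List (Int × Int))) :
    can_all_robot_reach_target target robots stations capacity visited_robots visited_stations =
    can_all_robot_reach_target_alt target robots stations capacity visited_robots visited_stations := by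
  unfold can_all_robot_reach_target can_all_robot_reach_target_alt
  set vr0 : PySem.Set (Int × Int) := PySem.Set.ofList (visited_robots.getD []) with hvr0
  set vs0 : PySem.Set (Int × Int) := PySem.Set.ofList (visited_stations.getD []) with hvs0
  have hndvr0 : vr0.Nodup := PySem.Set.nodup_ofList _
  have hinv0 : PvInvA capacity target robots stations vr0 vs0 [target] vr0 vs0 := by
    refine ⟨hndvr0, fun x hx => Or.inl hx, fun x hx => hx, ?_, fun p hp => Or.inl hp,
      fun x hx => hx, ?_, ?_⟩
    · intro q hq
      rcases List.mem_cons.mp hq with rfl | h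
      · exact PvReach.base
      · exact absurd h (List.not_mem_nil)
    · intro s _ _ p hp hpq
      rcases hp with rfl | ⟨hv, h0⟩
      · exact absurd (List.mem_cons_self) hpq
      · exact absurd hv h0
    · intro r _ _ p hp hpq
      rcases hp with rfl | ⟨hv, h0⟩
      · exact absurd (List.mem_cons_self) hpq
      · exact absurd hv h0
  have hmeas : ([target] : List (Int × Int)).length + pvMu stations vs0 ≤ stations.length + 1 := by
    have h1 : pvMu stations vs0 ≤ stations.toFinset.card := Finset.card_filter_le _ _
    have h2 : stations.toFinset.card ≤ stations.length := stations.toFinset_card_le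
    simp only [List.length_cons, List.length_nil]
    omega
  obtain ⟨hndA, hmemA⟩ := pvBfsLoop_spec capacity target robots stations vr0 vs0
    (stations.length + 1) [target] vr0 vs0 hinv0 hmeas
  have hcnd := nodup_pvCand stations vs0
  have hmemP := mem_pvRounds_iff capacity target (pvCand stations vs0) hcnd
  have hndB := nodup_pvVisit capacity
    (pvRounds (pvCand stations vs0) capacity (pvCand stations vs0).length [target])
    robots vr0 hndvr0
  have hmemB := mem_pvVisit capacity
    (pvRounds (pvCand stations vs0) capacity (pvCand stations vs0).length [target]) robots vr0
  have hsame : ∀ x,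
      x ∈ pvBfsLoop robots stations capacity (stations.length + 1) [target] vr0 vs0 ↔
      x ∈ robots.foldl (fun v r =>
        if (pvRounds (pvCand stations vs0) capacity (pvCand stations vs0).length [target]).any
            (fun p => pvCloseB capacity r p) then PySem.Set.add v r else v) vr0 := by
    intro x
    rw [hmemA x, hmemB x]
    constructor
    · rintro (hv | ⟨hr, p, hreach, hclose⟩)
      · exact Or.inl hv
      · exact Or.inr ⟨hr, p, (hmemP p).mpr hreach, hclose⟩
    · rintro (hv | ⟨hr, p, hp, hclose⟩)
      · exact Or.inl hv
      · exact Or.inr ⟨hr, p, (hmemP p).mp hp, hclose⟩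
  have hlen : (pvBfsLoop robots stations capacity (stations.length + 1) [target] vr0 vs0).length =
      (robots.foldl (fun v r =>
        if (pvRounds (pvCand stations vs0) capacity (pvCand stations vs0).length [target]).any
            (fun p => pvCloseB capacity r p) then PySem.Set.add v r else v) vr0).length := by
    rw [← List.toFinset_card_of_nodup hndA, ← List.toFinset_card_of_nodup hndB]
    congr 1
    apply Finset.ext
    intro a
    simp only [List.mem_toFinset]
    exact hsame a
  simp only [hlen]

-- ===== VERDICT (by name: the statement is the Claim_ definition above) =====
theorem can_all_robot_reach_target_spec : Claim_equal_can_all_robot_reach_target := by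
  intro target robots stations capacity visited_robots visited_stations _
  unfold Spec_can_all_robot_reach_target
  exact pv_main target robots stations capacity visited_robots visited_stations
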